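-- pv_equiv track=rewrite | github.com/Toanchit/insta_bot | main.py | convertStringToInt
-- ===== SOURCE A (Python) =====
-- def convertStringToInt(s):
--     try:
--         size =len(s)
--         temp=""
--         for i in s:
--             if i =='K':
--                 temp = temp+"000"
--                 break
--             if i!=',' and i!='.':
--                 temp=temp+i
--         return int(temp)
--     except:
--         return 0
-- ===== SOURCE B (Python) =====
-- def convertStringToInt(s):
--     try:
--         idx = s.find('K')
--         core = s if idx == -1 else s[:idx]
--         digits = ''.join(c for c in core if c != ',' and c != '.')
--         return int(digits + ('000' if idx != -1 else ''))
--     except: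
--         return 0
-- ===== Notes on version B (the rewrite author's own statement) =====
-- stated objective: simpler
-- what changed: B computes the result positionally (locate the first multiplier marker with str.find, slice the prefix before it, strip the separator characters with a filtering join, then append the thousands suffix) instead of A's single accumulating character loop with an inline break.
import Mathlib
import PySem

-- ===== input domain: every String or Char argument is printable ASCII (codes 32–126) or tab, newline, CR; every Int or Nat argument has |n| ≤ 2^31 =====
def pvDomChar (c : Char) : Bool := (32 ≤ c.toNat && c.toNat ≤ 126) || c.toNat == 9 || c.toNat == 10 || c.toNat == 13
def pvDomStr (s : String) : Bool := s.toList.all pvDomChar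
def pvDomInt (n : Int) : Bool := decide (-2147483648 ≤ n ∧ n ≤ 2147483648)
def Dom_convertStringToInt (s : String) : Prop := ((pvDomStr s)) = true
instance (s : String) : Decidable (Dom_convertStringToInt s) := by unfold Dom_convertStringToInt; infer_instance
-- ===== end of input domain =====

-- B computes the result positionally (find the first 'K', slice before it, filter separators,
-- append '000') instead of A's single accumulating character loop with a break; objective: simpler.

-- ===== PORT A =====
-- the for-loop of A: state is the accumulator `temp`; 'K' appends "000" and breaks
def pvLoopA : List Char → List Char → List Char
  | [], temp => temp
  | c :: cs, temp =>
    if c = 'K' then temp ++ "000".toList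
    else if c ≠ ',' ∧ c ≠ '.' then pvLoopA cs (temp ++ [c])
    else pvLoopA cs temp

def convertStringToInt (s : String) : Int :=
  let temp := pvLoopA s.toList []
  match PySem.Int.ofChars? temp with     -- int(temp); except: → 0
  | some n => n
  | none => 0

-- ===== PORT B =====
def convertStringToInt_alt (s : String) : Int :=
  let idx := PySem.Str.find s "K"
  let core := if idx = -1 then s.toList else PySem.List.slice s.toList none (some idx)
  let digits := core.filter (fun c => decide (c ≠ ',' ∧ c ≠ '.'))
  let res := digits ++ (if idx ≠ -1 then "000".toList else [])
  match PySem.Int.ofChars? res with      -- int(...); except: → 0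
  | some n => n
  | none => 0

-- ===== PRECONDITION & SPEC =====
def Spec_convertStringToInt (s : String) (out : Int) : Prop := out = convertStringToInt_alt s
instance (s : String) (out : Int) : Decidable (Spec_convertStringToInt s out) := by unfold Spec_convertStringToInt; infer_instance

-- ===== CLAIM (what is proved, stated in full; the proofs are below) =====
def Claim_equal_convertStringToInt : Prop := ∀ (s : String), Dom_convertStringToInt s → Spec_convertStringToInt s (convertStringToInt s)

-- ===== LEMMAS AND PROOFS =====

-- A's loop result, in closed form: filtered prefix before the first 'K', plus "000" iff a 'K' occurs
theorem pvLoopA_eq (l acc : List Char) :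
    pvLoopA l acc =
      acc ++ (l.takeWhile (· ≠ 'K')).filter (fun c => decide (c ≠ ',' ∧ c ≠ '.'))
          ++ (if 'K' ∈ l then "000".toList else []) := by
  induction l generalizing acc with
  | nil => simp [pvLoopA]
  | cons c cs ih =>
    by_cases hK : c = 'K'
    · subst hK; simp [pvLoopA, List.takeWhile]
    · by_cases hsep : c ≠ ',' ∧ c ≠ '.'
      · simp [pvLoopA, hK, hsep, ih, List.takeWhile, Ne.symm hK]
      · simp [pvLoopA, hK, hsep, ih, List.takeWhile, Ne.symm hK]

-- take n = takeWhile (· ≠ c) when c first occurs at index n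
theorem takeWhile_eq_take_of_first (c : Char) (l : List Char) (n : Nat)
    (hbefore : ∀ i < n, l[i]? ≠ some c) (hat : l[n]? = some c) :
    l.takeWhile (· ≠ c) = l.take n := by
  induction l generalizing n with
  | nil => simp at hat
  | cons a t ih =>
    cases n with
    | zero =>
      simp at hat
      simp [hat]
    | succ m =>
      have ha : a ≠ c := by
        have := hbefore 0 (Nat.succ_pos m)
        simpa using this
      rw [List.takeWhile_cons, if_pos (by simpa using ha)]
      simp only [List.take]
      congr 1
      exact ih m (fun i hi => by simpa using hbefore (i + 1) (Nat.succ_lt_succ hi))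
        (by simpa using hat)

-- singleton infix ↔ membership
theorem singleton_infix_iff_mem (c : Char) (l : List Char) : [c] <:+: l ↔ c ∈ l := by
  constructor
  · intro h; exact h.mem (by simp)
  · intro h
    obtain ⟨s, t, rfl⟩ := List.append_of_mem h
    exact ⟨s, t, by simp⟩

theorem main_eq (s : String) : convertStringToInt s = convertStringToInt_alt s := by
  unfold convertStringToInt convertStringToInt_alt
  rw [pvLoopA_eq]
  by_cases hc : PySem.Chars.find s.toList ['K'] = -1
  · have hnm : 'K' ∉ s.toList := by
      have := (PySem.Chars.find_eq_neg_one_iff (s := s.toList) (sub := ['K'])).mp hc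
      simpa [singleton_infix_iff_mem] using this
    have htw : s.toList.takeWhile (· ≠ 'K') = s.toList :=
      List.takeWhile_eq_self_iff.mpr (fun a ha => by
        simp [ne_eq]; rintro rfl; exact hnm ha)
    simp only [ne_eq, decide_not] at htw
    simp [hc, hnm, htw]
  · have hpos : 0 ≤ PySem.Chars.find s.toList ['K'] := by
      have := PySem.Chars.neg_one_le_find (s := s.toList) (sub := ['K'])
      omega
    set f := PySem.Chars.find s.toList ['K'] with hfdef
    have hspec := PySem.Chars.find_spec (s := s.toList) (sub := ['K']) hpos
    obtain ⟨hpre, hmin⟩ := hspec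
    have hat : s.toList[f.toNat]? = some 'K' := by
      obtain ⟨t, ht⟩ := hpre
      have hdt : s.toList.drop f.toNat = 'K' :: t := ht.symm
      have hd := congrArg List.head? hdt
      rwa [List.head?_drop, List.head?_cons] at hd
    have hbefore : ∀ i < f.toNat, s.toList[i]? ≠ some 'K' := by
      intro i hi hsome
      apply hmin i hi
      have hd : (s.toList.drop i).head? = some 'K' := by
        rw [List.head?_drop]; exact hsome
      cases hdrop : s.toList.drop i with
      | nil => simp [hdrop] at hd
      | cons a t =>
        rw [hdrop] at hd
        simp at hd
        exact ⟨t, by simp [hd]⟩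
    have htw : s.toList.takeWhile (· ≠ 'K') = s.toList.take f.toNat :=
      takeWhile_eq_take_of_first 'K' s.toList f.toNat hbefore hat
    simp only [ne_eq, decide_not] at htw
    have hmem : 'K' ∈ s.toList := by
      obtain ⟨hlt, heq⟩ := List.getElem?_eq_some_iff.mp hat
      exact heq ▸ List.getElem_mem hlt
    have hslice : PySem.List.slice s.toList none (some f) = s.toList.take f.toNat :=
      PySem.List.slice_to s.toList hpos
    rw [hfdef] at hc htw hslice
    simp [hc, hmem, htw, hslice]

-- ===== VERDICT (by name: the statement is the Claim_ definition above) =====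
theorem convertStringToInt_spec : Claim_equal_convertStringToInt := by
  intro s _
  unfold Spec_convertStringToInt
  exact main_eq s
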